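-- pv_equiv track=rewrite | github.com/chanwooo/daily-coding | Python3/2303_devmatch/1.py | solution
-- ===== SOURCE A (Python) =====
-- def solution(block):
--     n = len(block)
--     m = sum(block[0])
--     walls = []
--
--
--     blocks = [[] for _ in range(n * m)]  # blocks[i] := i 번 블록에 포함된 좌표
--
--     cnt = 0
--     for i, line in enumerate(block):
--         wall_line = []
--
--         j = 0
--         for col in line:
--             cnt += 1
--             for _ in range(col):
--                 wall_line.append(cnt)
--                 blocks[cnt].append((i, j))
--                 j += 1
--
--         walls.append(wall_line)
--
--     max_cnt = -1
--     dirs = ((1, 0), (0, 1), (-1, 0), (0, -1))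
--
--     for target_num in range(1, cnt + 1):
--
--         mem = set()
--         for i, j in blocks[target_num]:
--             for di, dj, in dirs:
--                 ni, nj = i + di, j + dj
--                 if not (0 <= ni < n and 0 <= nj < m):
--                     continue
--                 mem.add(walls[ni][nj])
--
--         if target_num in mem:
--             mem.remove(target_num)
--         if max_cnt < len(mem):
--             max_cnt = len(mem)
--
--     return max_cnt
-- ===== SOURCE B (Python) =====
-- def solution(block):
--     n = len(block)
--     m = sum(block[0])
--
--     walls = []
--     cnt = 0
--     for line in block:
--         wall_line = []
--         for col in line:
--             cnt += 1
--             wall_line.extend([cnt] * col)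
--         walls.append(wall_line)
--
--     adj = {t: set() for t in range(1, cnt + 1)}
--     for i, row in enumerate(walls):
--         for j, a in enumerate(row):
--             for ni, nj in ((i + 1, j), (i, j + 1), (i - 1, j), (i, j - 1)):
--                 if 0 <= ni < n and 0 <= nj < m:
--                     b = walls[ni][nj]
--                     if b != a:
--                         adj[a].add(b)
--
--     return max((len(s) for s in adj.values()), default=-1)
-- ===== Notes on version B (the rewrite author's own statement) =====
-- stated objective: simpler
-- what changed: B drops A's per-block coordinate index entirely (the n*m preallocated 'blocks' lists and the block-by-block rescan of stored coordinates) and instead makes a single enumerate pass over the wall grid, inserting each in-window differing neighbour id into a dict id->set built once; the answer is the maximum size over the dict's values (default -1); Pre_ excludes exactly the inputs on which A raises IndexError (empty input, a row expanding to fewer cells than the first row's sum, or at least as many runs as grid cells).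
import Mathlib
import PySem

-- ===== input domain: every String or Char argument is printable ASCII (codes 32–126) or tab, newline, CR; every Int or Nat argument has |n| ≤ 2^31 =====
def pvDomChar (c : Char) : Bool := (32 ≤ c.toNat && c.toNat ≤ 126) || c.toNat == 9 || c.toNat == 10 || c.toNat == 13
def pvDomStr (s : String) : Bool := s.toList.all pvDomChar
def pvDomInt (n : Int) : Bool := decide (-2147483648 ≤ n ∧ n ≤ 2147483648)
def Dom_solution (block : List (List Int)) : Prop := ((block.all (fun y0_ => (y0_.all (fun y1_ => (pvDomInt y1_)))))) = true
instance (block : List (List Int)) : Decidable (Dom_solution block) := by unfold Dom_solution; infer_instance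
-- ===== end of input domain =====

-- B replaces A's per-block coordinate lists and block-by-block 4-direction rescans with a single
-- right/down sweep over the grid recording differing-id pairs in a neighbour-set dict (objective: simpler).

-- ===== PORT A =====
-- A-side helpers: each is one loop body of A, named so the proofs can refer to it.
-- innermost 'for _ in range(col)': wall_line.append(cnt); blocks[cnt].append((i, j)); j += 1
def pvAInnerStep (cnt i : Int) (r : Int × List Int × List (List (Int × Int))) (_ : Int) :
    Int × List Int × List (List (Int × Int)) :=
  (r.1 + 1, r.2.1 ++ [cnt],
   PySem.List.pySetD r.2.2 cnt (PySem.List.pyGetD r.2.2 cnt [] ++ [(i, r.1)]))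

-- 'for col in line': cnt += 1 then the inner loop; state (cnt, j, wall_line, blocks)
def pvARowStep (i : Int) (q : Int × Int × List Int × List (List (Int × Int))) (col : Int) :
    Int × Int × List Int × List (List (Int × Int)) :=
  (q.1 + 1, (PySem.List.pyRange 0 col 1).foldl (pvAInnerStep (q.1 + 1) i) (q.2.1, q.2.2.1, q.2.2.2))

-- 'for i, line in enumerate(block)': state (cnt, walls, blocks)
def pvAOuterStep (st : Int × List (List Int) × List (List (Int × Int))) (p : Int × List Int) :
    Int × List (List Int) × List (List (Int × Int)) :=
  let inner := p.2.foldl (pvARowStep p.1) (st.1, 0, [], st.2.2)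
  (inner.1, st.2.1 ++ [inner.2.2.1], inner.2.2.2)

def pvDirs : List (Int × Int) := [(1, 0), (0, 1), (-1, 0), (0, -1)]

-- 'for di, dj in dirs': skip out-of-grid neighbours, else mem.add(walls[ni][nj])
def pvADir (n M : Int) (walls : List (List Int)) (c : Int × Int) (mem : PySem.Set Int)
    (d : Int × Int) : PySem.Set Int :=
  if 0 ≤ c.1 + d.1 ∧ c.1 + d.1 < n ∧ 0 ≤ c.2 + d.2 ∧ c.2 + d.2 < M then
    PySem.Set.add mem (PySem.List.pyGetD (PySem.List.pyGetD walls (c.1 + d.1) []) (c.2 + d.2) 0)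
  else mem

-- 'for i, j in blocks[target_num]'
def pvACell (n M : Int) (walls : List (List Int)) (mem : PySem.Set Int) (c : Int × Int) :
    PySem.Set Int :=
  pvDirs.foldl (pvADir n M walls c) mem

-- 'for target_num in range(1, cnt + 1)': build mem, drop target_num, update max_cnt
def pvAMaxStep (n M : Int) (walls : List (List Int)) (blocks : List (List (Int × Int)))
    (max_cnt t : Int) : Int :=
  let mem := (PySem.List.pyGetD blocks t []).foldl (pvACell n M walls) PySem.Set.empty
  let mem := if PySem.Set.contains mem t then (PySem.Set.remove? mem t).getD mem else mem
  if max_cnt < PySem.Set.len mem then PySem.Set.len mem else max_cnt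

-- literal transliteration of A
def solution (block : List (List Int)) : Int :=
  let n : Int := PySem.List.len block
  let m : Int := (PySem.List.pyGetD block 0 []).sum    -- block[0]: IndexError on empty input, excluded by Pre_
  let blocks0 : List (List (Int × Int)) := List.replicate ((n * m).toNat) []
  let st := (PySem.List.enumerate block).foldl pvAOuterStep (0, [], blocks0)
  (PySem.List.pyRange 1 (st.1 + 1) 1).foldl (pvAMaxStep n m st.2.1 st.2.2) (-1)

-- ===== PORT B =====
-- B-side helpers: one per loop of Source B.
-- 'for col in line': cnt += 1; wall_line.extend([cnt] * col)
def pvBRowParse (q : Int × List Int) (col : Int) : Int × List Int :=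
  (q.1 + 1, q.2 ++ List.replicate col.toNat (q.1 + 1))

-- 'for line in block'
def pvBParse (st : Int × List (List Int)) (line : List Int) : Int × List (List Int) :=
  let inner := line.foldl pvBRowParse (st.1, [])
  (inner.1, st.2 ++ [inner.2])

-- 'for ni, nj in (...)': if in the n x m window and the id differs, adj[a].add(b)
-- (a is always a key of adj: ids 1..cnt; Dict.modify is exact here)
def pvBNbr (n M : Int) (W : List (List Int)) (a : Int) (adj : PySem.Dict Int (PySem.Set Int))
    (p : Int × Int) : PySem.Dict Int (PySem.Set Int) :=
  if 0 ≤ p.1 ∧ p.1 < n ∧ 0 ≤ p.2 ∧ p.2 < M then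
    let b := PySem.List.pyGetD (PySem.List.pyGetD W p.1 []) p.2 0
    if b ≠ a then adj.modify a [] (fun s => PySem.Set.add s b) else adj
  else adj

-- 'for j, a in enumerate(row)': the four neighbour coordinates of (i, j)
def pvBCell (n M : Int) (W : List (List Int)) (i : Int) (adj : PySem.Dict Int (PySem.Set Int))
    (q : Int × Int) : PySem.Dict Int (PySem.Set Int) :=
  ([(i + 1, q.1), (i, q.1 + 1), (i - 1, q.1), (i, q.1 - 1)]).foldl (pvBNbr n M W q.2) adj

-- 'for i, row in enumerate(walls)'
def pvBRowScan (n M : Int) (W : List (List Int)) (adj : PySem.Dict Int (PySem.Set Int))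
    (p : Int × List Int) : PySem.Dict Int (PySem.Set Int) :=
  (PySem.List.enumerate p.2).foldl (pvBCell n M W p.1) adj

-- 'max((len(s) for s in adj.values()), default=-1)' as the running maximum from -1
def pvBMaxStep (max_cnt : Int) (s : PySem.Set Int) : Int :=
  if max_cnt < PySem.Set.len s then PySem.Set.len s else max_cnt

-- literal transliteration of B (Source B); '[cnt] * col' is replicate col.toNat
def solution_alt (block : List (List Int)) : Int :=
  let n : Int := PySem.List.len block
  let m : Int := (PySem.List.pyGetD block 0 []).sum    -- block[0]: IndexError on empty input, excluded by Pre_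
  let st := block.foldl pvBParse (0, [])
  let adj0 : PySem.Dict Int (PySem.Set Int) :=
    (PySem.List.pyRange 1 (st.1 + 1) 1).foldl (fun d t => d.insert t PySem.Set.empty) PySem.Dict.empty
  let adj := (PySem.List.enumerate st.2).foldl (pvBRowScan n m st.2) adj0
  adj.values.foldl pvBMaxStep (-1)

-- ===== PRECONDITION & SPEC =====
-- Pre_ is exactly the set of inputs on which A returns: a non-empty run-length grid in which every
-- row expands to at least m = sum(block[0]) cells (otherwise A's neighbour scan reads past a row:
-- IndexError) and which has no runs at all or fewer runs than the n*m slots of A's blocks array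
-- (otherwise blocks[...]: IndexError).
def Pre_solution (block : List (List Int)) : Prop :=
  block ≠ [] ∧
  (∀ row ∈ block, block.headI.sum ≤ ((row.map Int.toNat).sum : Int)) ∧
  ((block.map List.length).sum = 0 ∨
    ((block.map List.length).sum : Int) < (block.length : Int) * block.headI.sum)
instance (block : List (List Int)) : Decidable (Pre_solution block) := by
  unfold Pre_solution; infer_instance

def pvWitness_solution : List (List Int) := [[2, 1], [1, 2]]

def Spec_solution (block : List (List Int)) (out : Int) : Prop := out = solution_alt block
instance (block : List (List Int)) (out : Int) : Decidable (Spec_solution block out) := by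
  unfold Spec_solution; infer_instance

-- ===== CLAIM (what is proved, stated in full; the proofs are below) =====
def Claim_equal_solution : Prop :=
  ∀ (block : List (List Int)), Dom_solution block → Pre_solution block →
    Spec_solution block (solution block)

-- ===== LEMMAS AND PROOFS =====

-- ---- spec-side descriptions of the parsed grid ----

def pvRowWall (c0 : Int) : List Int → List Int
  | [] => []
  | col :: rest => List.replicate col.toNat (c0 + 1) ++ pvRowWall (c0 + 1) rest

def pvWalls (c0 : Int) : List (List Int) → List (List Int)
  | [] => []
  | line :: rest => pvRowWall c0 line :: pvWalls (c0 + line.length) rest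

def pvRunCells (t i j : Int) : Nat → List (Int × Int × Int)
  | 0 => []
  | k + 1 => (t, i, j) :: pvRunCells t i (j + 1) k

def pvRowCells (i c0 j : Int) : List Int → List (Int × Int × Int)
  | [] => []
  | col :: rest => pvRunCells (c0 + 1) i j col.toNat ++ pvRowCells i (c0 + 1) (j + col.toNat) rest

def pvCells (c0 i0 : Int) : List (List Int) → List (Int × Int × Int)
  | [] => []
  | line :: rest => pvRowCells i0 c0 0 line ++ pvCells (c0 + line.length) (i0 + 1) rest

def pvBlStep (bl : List (List (Int × Int))) (c : Int × Int × Int) : List (List (Int × Int)) :=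
  PySem.List.pySetD bl c.1 (PySem.List.pyGetD bl c.1 [] ++ [(c.2.1, c.2.2)])

def pvId (W : List (List Int)) (i j : Int) : Int :=
  PySem.List.pyGetD (PySem.List.pyGetD W i []) j 0

theorem pvId_def (W : List (List Int)) (i j : Int) :
    PySem.List.pyGetD (PySem.List.pyGetD W i []) j 0 = pvId W i j := rfl

-- ---- parse-phase lemmas ----

theorem pvLen_pyRange_zero (col : Int) : (PySem.List.pyRange 0 col 1).length = col.toNat := by
  by_cases h : 0 ≤ col
  · rw [← Int.toNat_of_nonneg h, PySem.List.pyRange_zero_natCast]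
    simp; omega
  · have he : PySem.List.pyRange 0 col 1 = [] := by
      rw [List.eq_nil_iff_forall_not_mem]
      intro x hx
      rw [PySem.List.mem_pyRange_one] at hx
      omega
    rw [he]; simp; omega

theorem pvA_inner_fold (cnt i : Int) (l : List Int) (j : Int) (wl : List Int)
    (bl : List (List (Int × Int))) :
    l.foldl (pvAInnerStep cnt i) (j, wl, bl)
    = (j + l.length, wl ++ List.replicate l.length cnt,
       (pvRunCells cnt i j l.length).foldl pvBlStep bl) := by
  induction l generalizing j wl bl with
  | nil => simp [pvRunCells]
  | cons x xs ih =>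
    rw [List.foldl_cons]
    show (xs.foldl (pvAInnerStep cnt i)
      (j + 1, wl ++ [cnt], PySem.List.pySetD bl cnt (PySem.List.pyGetD bl cnt [] ++ [(i, j)]))) = _
    rw [ih]
    simp only [List.length_cons, pvRunCells, List.foldl_cons]
    refine congrArg₂ Prod.mk (by push_cast; ring) (congrArg₂ Prod.mk ?_ rfl)
    simp [List.replicate_succ]

theorem pvA_row_fold (i : Int) (line : List Int) (c0 j0 : Int) (wl : List Int)
    (bl : List (List (Int × Int))) :
    line.foldl (pvARowStep i) (c0, j0, wl, bl)
    = (c0 + line.length, j0 + ((pvRowWall c0 line).length : Int), wl ++ pvRowWall c0 line,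
       (pvRowCells i c0 j0 line).foldl pvBlStep bl) := by
  induction line generalizing c0 j0 wl bl with
  | nil => simp [pvRowWall, pvRowCells]
  | cons col rest ih =>
    rw [List.foldl_cons]
    show rest.foldl (pvARowStep i)
      (c0 + 1, (PySem.List.pyRange 0 col 1).foldl (pvAInnerStep (c0 + 1) i) (j0, wl, bl)) = _
    have h1 := pvA_inner_fold (c0 + 1) i (PySem.List.pyRange 0 col 1) j0 wl bl
    rw [pvLen_pyRange_zero] at h1
    rw [h1, ih]
    simp only [pvRowWall, pvRowCells, List.length_cons, List.length_append,
      List.length_replicate, List.foldl_append]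
    refine congrArg₂ Prod.mk (by push_cast; ring)
      (congrArg₂ Prod.mk (by push_cast; ring) (congrArg₂ Prod.mk ?_ rfl))
    rw [List.append_assoc]

theorem pvA_outer_fold (rows : List (List Int)) (c0 i0 : Int) (ws : List (List Int))
    (bl : List (List (Int × Int))) :
    (PySem.List.enumerate rows i0).foldl pvAOuterStep (c0, ws, bl)
    = (c0 + ((rows.map List.length).sum : Int), ws ++ pvWalls c0 rows,
       (pvCells c0 i0 rows).foldl pvBlStep bl) := by
  induction rows generalizing c0 i0 ws bl with
  | nil => simp [pvWalls, pvCells, PySem.List.enumerate]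
  | cons line rest ih =>
    rw [show PySem.List.enumerate (line :: rest) i0
        = (i0, line) :: PySem.List.enumerate rest (i0 + 1) from rfl]
    rw [List.foldl_cons]
    show (PySem.List.enumerate rest (i0 + 1)).foldl pvAOuterStep
      ((line.foldl (pvARowStep i0) (c0, 0, [], bl)).1,
       ws ++ [(line.foldl (pvARowStep i0) (c0, 0, [], bl)).2.2.1],
       (line.foldl (pvARowStep i0) (c0, 0, [], bl)).2.2.2) = _
    rw [pvA_row_fold i0 line c0 0 [] bl]
    simp only [List.nil_append]
    rw [ih]
    simp only [pvWalls, pvCells, List.map_cons, List.sum_cons, List.foldl_append]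
    refine congrArg₂ Prod.mk (by push_cast; ring) (congrArg₂ Prod.mk ?_ rfl)
    rw [List.append_assoc]
    rfl

theorem pvB_row_fold (line : List Int) (c0 : Int) (wl : List Int) :
    line.foldl pvBRowParse (c0, wl) = (c0 + line.length, wl ++ pvRowWall c0 line) := by
  induction line generalizing c0 wl with
  | nil => simp [pvRowWall]
  | cons col rest ih =>
    rw [List.foldl_cons]
    show rest.foldl pvBRowParse (c0 + 1, wl ++ List.replicate col.toNat (c0 + 1)) = _
    rw [ih]
    simp only [pvRowWall, List.length_cons]
    refine congrArg₂ Prod.mk (by push_cast; ring) ?_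
    rw [List.append_assoc]

theorem pvB_outer_fold (rows : List (List Int)) (c0 : Int) (ws : List (List Int)) :
    rows.foldl pvBParse (c0, ws)
    = (c0 + ((rows.map List.length).sum : Int), ws ++ pvWalls c0 rows) := by
  induction rows generalizing c0 ws with
  | nil => simp [pvWalls]
  | cons line rest ih =>
    rw [List.foldl_cons]
    show rest.foldl pvBParse
      ((line.foldl pvBRowParse (c0, [])).1, ws ++ [(line.foldl pvBRowParse (c0, [])).2]) = _
    rw [pvB_row_fold line c0 []]
    simp only [List.nil_append]
    rw [ih]
    simp only [pvWalls, List.map_cons, List.sum_cons]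
    refine congrArg₂ Prod.mk (by push_cast; ring) ?_
    rw [List.append_assoc]
    rfl

-- ---- shape facts about the spec walls ----

theorem pvMem_rowWall (c0 : Int) (line : List Int) (v : Int) (h : v ∈ pvRowWall c0 line) :
    c0 < v ∧ v ≤ c0 + line.length := by
  induction line generalizing c0 with
  | nil => simp [pvRowWall] at h
  | cons col rest ih =>
    simp only [pvRowWall, List.mem_append, List.mem_replicate] at h
    rcases h with ⟨-, rfl⟩ | h
    · simp only [List.length_cons]
      push_cast
      omega
    · have := ih (c0 + 1) h
      simp only [List.length_cons]
      push_cast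
      omega

theorem pvMem_walls (c0 : Int) (rows : List (List Int)) (row : List Int) (v : Int)
    (hr : row ∈ pvWalls c0 rows) (hv : v ∈ row) :
    c0 < v ∧ v ≤ c0 + ((rows.map List.length).sum : Int) := by
  induction rows generalizing c0 with
  | nil => simp [pvWalls] at hr
  | cons line rest ih =>
    simp only [pvWalls, List.mem_cons] at hr
    have hs : ((((line :: rest).map List.length).sum : Nat) : Int)
        = (line.length : Int) + (((rest.map List.length).sum : Nat) : Int) := by
      simp
    rw [hs]
    rcases hr with rfl | hr
    · have h1 := pvMem_rowWall c0 line v hv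
      have h2 : (0 : Int) ≤ ((rest.map List.length).sum : Int) := by positivity
      omega
    · have := ih (c0 + line.length) hr
      omega

-- ---- cell-list membership ↔ wall lookups ----

theorem pvMem_runCells (t i j : Int) (k : Nat) (t' i' j' : Int) :
    (t', i', j') ∈ pvRunCells t i j k ↔ t' = t ∧ i' = i ∧ ∃ kk : Nat, kk < k ∧ j' = j + (kk : Int) := by
  induction k generalizing j with
  | zero => simp [pvRunCells]
  | succ p ih =>
    simp only [pvRunCells, List.mem_cons, ih, Prod.mk.injEq]
    constructor
    · rintro (⟨rfl, rfl, rfl⟩ | ⟨rfl, rfl, kk, hkk, rfl⟩)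
      · exact ⟨rfl, rfl, 0, by omega, by simp⟩
      · exact ⟨rfl, rfl, kk + 1, by omega, by push_cast; ring⟩
    · rintro ⟨rfl, rfl, kk, hkk, rfl⟩
      cases kk with
      | zero => exact Or.inl ⟨rfl, rfl, by simp⟩
      | succ q => exact Or.inr ⟨rfl, rfl, q, by omega, by push_cast; ring⟩

theorem pvMem_rowCells (line : List Int) (i0 c0 j0 t i j : Int) :
    (t, i, j) ∈ pvRowCells i0 c0 j0 line ↔
      i = i0 ∧ ∃ k : Nat, j = j0 + (k : Int) ∧ (pvRowWall c0 line)[k]? = some t := by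
  induction line generalizing c0 j0 with
  | nil => simp [pvRowCells, pvRowWall]
  | cons col rest ih =>
    simp only [pvRowCells, pvRowWall, List.mem_append, pvMem_runCells, ih]
    constructor
    · rintro (⟨rfl, rfl, kk, hkk, rfl⟩ | ⟨rfl, k, rfl, hw⟩)
      · refine ⟨rfl, kk, rfl, ?_⟩
        rw [List.getElem?_append_left (by simpa using hkk)]
        simp [hkk]
      · refine ⟨rfl, col.toNat + k, by push_cast; ring, ?_⟩
        rw [List.getElem?_append_right (by simp)]
        simpa using hw
    · rintro ⟨rfl, k, rfl, hw⟩
      by_cases hk : k < col.toNat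
      · left
        rw [List.getElem?_append_left (by simpa using hk)] at hw
        simp only [List.getElem?_replicate, if_pos hk, Option.some.injEq] at hw
        exact ⟨hw.symm, rfl, k, hk, rfl⟩
      · right
        rw [List.getElem?_append_right (by simp; omega)] at hw
        refine ⟨rfl, k - col.toNat, ?_, by simpa using hw⟩
        omega

theorem pvMem_cells (rows : List (List Int)) (c0 i0 t i j : Int) :
    (t, i, j) ∈ pvCells c0 i0 rows ↔
      ∃ r k : Nat, i = i0 + (r : Int) ∧ j = (k : Int) ∧
        ((pvWalls c0 rows)[r]?.bind (fun row => row[k]?)) = some t := by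
  induction rows generalizing c0 i0 with
  | nil => simp [pvCells, pvWalls]
  | cons line rest ih =>
    simp only [pvCells, List.mem_append, pvMem_rowCells, ih]
    constructor
    · rintro (⟨rfl, k, rfl, hw⟩ | ⟨r, k, rfl, rfl, hw⟩)
      · exact ⟨0, k, by simp, by simp, by simpa [pvWalls] using hw⟩
      · exact ⟨r + 1, k, by push_cast; ring, rfl, by simpa [pvWalls] using hw⟩
    · rintro ⟨r, k, rfl, rfl, hw⟩
      cases r with
      | zero =>
        left
        refine ⟨by simp, k, by simp, ?_⟩
        simpa [pvWalls] using hw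
      | succ q =>
        right
        refine ⟨q, k, by push_cast; ring, rfl, ?_⟩
        simpa [pvWalls] using hw

theorem pvCells_id_bounds (rows : List (List Int)) (c : Int × Int × Int)
    (hc : c ∈ pvCells 0 0 rows) :
    1 ≤ c.1 ∧ c.1 ≤ ((rows.map List.length).sum : Int) := by
  obtain ⟨t', i', j'⟩ := c
  rw [pvMem_cells] at hc
  obtain ⟨r, k, -, -, hw⟩ := hc
  rcases Option.bind_eq_some_iff.1 hw with ⟨row, h1, h2⟩
  have hrow : row ∈ pvWalls 0 rows := List.mem_of_getElem? h1
  have hv : t' ∈ row := List.mem_of_getElem? h2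
  have := pvMem_walls 0 rows row t' hrow hv
  exact ⟨by omega, by omega⟩

-- ---- A's blocks array after the parse ----

theorem pvGetD_out_of_range (xs : List (List (Int × Int))) (t : Int)
    (h : ¬ (-(xs.length : Int) ≤ t ∧ t < (xs.length : Int))) :
    PySem.List.pyGetD xs t [] = [] := by
  apply PySem.List.pyGetD_of_none
  rw [PySem.List.pyGet?_eq_none_iff]
  intro hc
  exact h hc

theorem pvGetD_foldl_blStep (l : List (Int × Int × Int)) (bl : List (List (Int × Int))) (t : Int)
    (ht : 0 ≤ t)
    (hl : ∀ c ∈ l, 0 ≤ c.1 ∧ c.1 < (bl.length : Int)) :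
    PySem.List.pyGetD (l.foldl pvBlStep bl) t []
      = PySem.List.pyGetD bl t [] ++ (l.filter (fun c => c.1 = t)).map (fun c => (c.2.1, c.2.2)) := by
  induction l generalizing bl with
  | nil => simp
  | cons c rest ih =>
    obtain ⟨hc0, hc1⟩ := hl c (by simp)
    rw [List.foldl_cons]
    rw [ih _ (fun c' hc' => by
      have := hl c' (by simp [hc'])
      simpa [pvBlStep, PySem.List.length_pySetD] using this)]
    by_cases htr : t < (bl.length : Int)
    · have key : PySem.List.pyGetD (pvBlStep bl c) t []
          = if c.1 = t then PySem.List.pyGetD bl t [] ++ [(c.2.1, c.2.2)]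
            else PySem.List.pyGetD bl t [] := by
        unfold pvBlStep
        rw [show c.1 = ((c.1.toNat : Nat) : Int) from by omega,
            show t = ((t.toNat : Nat) : Int) from by omega]
        rw [PySem.List.pyGetD_pySetD_natCast _ _ _ _ _ (by omega)]
        by_cases he : c.1 = t
        · rw [if_pos (by omega), if_pos (by omega),
              show ((c.1.toNat : Nat) : Int) = t from by omega,
              show ((t.toNat : Nat) : Int) = t from by omega]
        · rw [if_neg (by omega), if_neg (by omega)]
      rw [key]
      by_cases he : c.1 = t
      · rw [if_pos he]
        simp only [List.filter_cons, he, decide_true]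
        simp
      · rw [if_neg he]
        simp only [List.filter_cons, decide_eq_true_eq, if_neg he]
    · have h1 : PySem.List.pyGetD bl t [] = [] := pvGetD_out_of_range _ _ (by omega)
      have h2 : PySem.List.pyGetD (pvBlStep bl c) t [] = [] := by
        apply pvGetD_out_of_range
        simp [pvBlStep, PySem.List.length_pySetD]
        omega
      have h3 : c.1 ≠ t := by omega
      rw [h1, h2]
      simp only [List.filter_cons, decide_eq_true_eq, if_neg h3]

theorem pvGetD_replicate_nil (k : Nat) (t : Int) :
    PySem.List.pyGetD (List.replicate k ([] : List (Int × Int))) t [] = [] := by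
  rcases h : PySem.List.pyGet? (List.replicate k ([] : List (Int × Int))) t with _ | v
  · exact PySem.List.pyGetD_of_none _ _ _ h
  · have hv := PySem.List.mem_of_pyGet?_eq_some _ h
    have : v = [] := List.eq_of_mem_replicate hv
    subst this
    simp [PySem.List.pyGetD, h]

theorem pvMem_cellsOf (l : List (Int × Int × Int)) (t i j : Int) :
    (i, j) ∈ (l.filter (fun c => c.1 = t)).map (fun c => (c.2.1, c.2.2)) ↔ (t, i, j) ∈ l := by
  simp only [List.mem_map, List.mem_filter, decide_eq_true_eq]
  constructor
  · rintro ⟨⟨t', i', j'⟩, ⟨hm, rfl⟩, heq⟩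
    simp only [Prod.mk.injEq] at heq
    obtain ⟨rfl, rfl⟩ := heq
    exact hm
  · intro h
    exact ⟨(t, i, j), ⟨h, rfl⟩, rfl⟩

-- ---- membership in A's per-block neighbour set ----

theorem pvMem_foldl_add_if {ι : Type} (l : List ι) (p : ι → Prop) [DecidablePred p]
    (f : ι → Int) (s : PySem.Set Int) (y : Int) :
    y ∈ l.foldl (fun s x => if p x then PySem.Set.add s (f x) else s) s ↔
      y ∈ s ∨ ∃ x ∈ l, p x ∧ y = f x := by
  induction l generalizing s with
  | nil => simp
  | cons x xs ih =>
    rw [List.foldl_cons, ih]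
    by_cases hp : p x
    · rw [if_pos hp, PySem.Set.mem_add]
      constructor
      · rintro ((h | h) | ⟨z, hz, h1, h2⟩)
        · exact Or.inl h
        · exact Or.inr ⟨x, by simp, hp, h⟩
        · exact Or.inr ⟨z, by simp [hz], h1, h2⟩
      · rintro (h | ⟨z, hz, h1, h2⟩)
        · exact Or.inl (Or.inl h)
        · rcases List.mem_cons.1 hz with rfl | hz
          · exact Or.inl (Or.inr h2)
          · exact Or.inr ⟨z, hz, h1, h2⟩
    · rw [if_neg hp]
      constructor
      · rintro (h | ⟨z, hz, h1, h2⟩)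
        · exact Or.inl h
        · exact Or.inr ⟨z, by simp [hz], h1, h2⟩
      · rintro (h | ⟨z, hz, h1, h2⟩)
        · exact Or.inl h
        · rcases List.mem_cons.1 hz with rfl | hz
          · exact absurd h1 hp
          · exact Or.inr ⟨z, hz, h1, h2⟩

theorem pvNodup_foldl_add_if {ι : Type} (l : List ι) (p : ι → Prop) [DecidablePred p]
    (f : ι → Int) (s : PySem.Set Int) (h : s.Nodup) :
    (l.foldl (fun s x => if p x then PySem.Set.add s (f x) else s) s).Nodup := by
  induction l generalizing s with
  | nil => exact h
  | cons x xs ih =>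
    rw [List.foldl_cons]
    by_cases hp : p x
    · rw [if_pos hp]; exact ih _ (PySem.Set.nodup_add _ _ h)
    · rw [if_neg hp]; exact ih _ h

theorem pvMem_memA (W : List (List Int)) (n M : Int) (cells : List (Int × Int))
    (s0 : PySem.Set Int) (y : Int) :
    y ∈ cells.foldl (pvACell n M W) s0 ↔
      y ∈ s0 ∨ ∃ c ∈ cells, ∃ d ∈ pvDirs,
        (0 ≤ c.1 + d.1 ∧ c.1 + d.1 < n ∧ 0 ≤ c.2 + d.2 ∧ c.2 + d.2 < M) ∧
          y = pvId W (c.1 + d.1) (c.2 + d.2) := by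
  induction cells generalizing s0 with
  | nil => simp
  | cons c rest ih =>
    rw [List.foldl_cons]
    show y ∈ rest.foldl (pvACell n M W) (pvDirs.foldl (pvADir n M W c) s0) ↔ _
    rw [ih]
    have hinner : pvDirs.foldl (pvADir n M W c) s0
        = pvDirs.foldl
            (fun s d => if (0 ≤ c.1 + d.1 ∧ c.1 + d.1 < n ∧ 0 ≤ c.2 + d.2 ∧ c.2 + d.2 < M)
              then PySem.Set.add s (pvId W (c.1 + d.1) (c.2 + d.2)) else s) s0 := rfl
    rw [hinner,
      pvMem_foldl_add_if pvDirs
        (fun d : Int × Int => 0 ≤ c.1 + d.1 ∧ c.1 + d.1 < n ∧ 0 ≤ c.2 + d.2 ∧ c.2 + d.2 < M)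
        (fun d : Int × Int => pvId W (c.1 + d.1) (c.2 + d.2)) s0 y]
    constructor
    · rintro ((h | ⟨d, hd, hb, hy⟩) | ⟨c', hc', d, hd, hb, hy⟩)
      · exact Or.inl h
      · exact Or.inr ⟨c, by simp, d, hd, hb, hy⟩
      · exact Or.inr ⟨c', by simp [hc'], d, hd, hb, hy⟩
    · rintro (h | ⟨c', hc', d, hd, hb, hy⟩)
      · exact Or.inl (Or.inl h)
      · rcases List.mem_cons.1 hc' with rfl | hc'
        · exact Or.inl (Or.inr ⟨d, hd, hb, hy⟩)
        · exact Or.inr ⟨c', hc', d, hd, hb, hy⟩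

theorem pvNodup_memA (W : List (List Int)) (n M : Int) (cells : List (Int × Int))
    (s0 : PySem.Set Int) (h : s0.Nodup) :
    (cells.foldl (pvACell n M W) s0).Nodup := by
  induction cells generalizing s0 with
  | nil => exact h
  | cons c rest ih =>
    rw [List.foldl_cons]
    show (rest.foldl (pvACell n M W) (pvDirs.foldl (pvADir n M W c) s0)).Nodup
    refine ih _ ?_
    show (pvDirs.foldl
      (fun s d => if (0 ≤ c.1 + d.1 ∧ c.1 + d.1 < n ∧ 0 ≤ c.2 + d.2 ∧ c.2 + d.2 < M)
        then PySem.Set.add s (pvId W (c.1 + d.1) (c.2 + d.2)) else s) s0).Nodup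
    exact pvNodup_foldl_add_if pvDirs
      (fun d : Int × Int => 0 ≤ c.1 + d.1 ∧ c.1 + d.1 < n ∧ 0 ≤ c.2 + d.2 ∧ c.2 + d.2 < M)
      (fun d : Int × Int => pvId W (c.1 + d.1) (c.2 + d.2)) s0 h

theorem pvMem_discard_port (s : PySem.Set Int) (t u : Int) :
    u ∈ (if PySem.Set.contains s t then (PySem.Set.remove? s t).getD s else s) ↔
      u ∈ s ∧ u ≠ t := by
  by_cases hc : PySem.Set.contains s t
  · rw [if_pos hc, PySem.Set.remove?_of_mem ((PySem.Set.contains_iff _ _).1 hc)]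
    simp [PySem.Set.mem_discard]
  · rw [if_neg hc]
    have : t ∉ s := fun hm => hc ((PySem.Set.contains_iff _ _).2 hm)
    constructor
    · intro hu; exact ⟨hu, fun he => this (he ▸ hu)⟩
    · exact fun h => h.1

theorem pvNodup_discard_port (s : PySem.Set Int) (t : Int) (h : s.Nodup) :
    (if PySem.Set.contains s t then (PySem.Set.remove? s t).getD s else s).Nodup := by
  by_cases hc : PySem.Set.contains s t
  · rw [if_pos hc, PySem.Set.remove?_of_mem ((PySem.Set.contains_iff _ _).1 hc)]
    exact PySem.Set.nodup_discard _ _ h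
  · rw [if_neg hc]; exact h

-- ---- B's dict sweep ----

theorem pvMem_getD_foldl {ι : Type} (l : List ι) (g : PySem.Dict Int (PySem.Set Int) → ι → PySem.Dict Int (PySem.Set Int))
    (t u : Int) (Q : ι → Prop)
    (h : ∀ d x, x ∈ l → (u ∈ (g d x).getD t ([] : PySem.Set Int) ↔ u ∈ d.getD t ([] : PySem.Set Int) ∨ Q x)) :
    ∀ d, u ∈ (l.foldl g d).getD t ([] : PySem.Set Int) ↔ u ∈ d.getD t ([] : PySem.Set Int) ∨ ∃ x ∈ l, Q x := by
  induction l with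
  | nil => intro d; simp
  | cons x xs ih =>
    intro d
    rw [List.foldl_cons, ih (fun d' x' hx' => h d' x' (by simp [hx'])), h d x (by simp)]
    constructor
    · rintro ((h1 | h1) | ⟨z, hz, hq⟩)
      · exact Or.inl h1
      · exact Or.inr ⟨x, by simp, h1⟩
      · exact Or.inr ⟨z, by simp [hz], hq⟩
    · rintro (h1 | ⟨z, hz, hq⟩)
      · exact Or.inl (Or.inl h1)
      · rcases List.mem_cons.1 hz with rfl | hz
        · exact Or.inl (Or.inr hq)
        · exact Or.inr ⟨z, hz, hq⟩

theorem pvNodup_getD_foldl {ι : Type} (l : List ι) (g : PySem.Dict Int (PySem.Set Int) → ι → PySem.Dict Int (PySem.Set Int))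
    (t : Int) (h : ∀ d x, (d.getD t ([] : PySem.Set Int)).Nodup → ((g d x).getD t ([] : PySem.Set Int)).Nodup) :
    ∀ d, (d.getD t ([] : PySem.Set Int)).Nodup → ((l.foldl g d).getD t ([] : PySem.Set Int)).Nodup := by
  induction l with
  | nil => intro d hd; exact hd
  | cons x xs ih => intro d hd; rw [List.foldl_cons]; exact ih _ (h d x hd)

theorem pvKeys_foldl {ι : Type} (l : List ι) (g : PySem.Dict Int (PySem.Set Int) → ι → PySem.Dict Int (PySem.Set Int))
    (K : List Int) (h : ∀ d x, x ∈ l → d.keys = K → (g d x).keys = K) :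
    ∀ d, d.keys = K → (l.foldl g d).keys = K := by
  induction l with
  | nil => intro d hd; exact hd
  | cons x xs ih =>
    intro d hd
    rw [List.foldl_cons]
    exact ih (fun d x hx => h d x (by simp [hx])) _ (h d x (by simp) hd)

theorem pvGetD_adj0 (l : List Int) (t : Int) :
    ∀ d : PySem.Dict Int (PySem.Set Int), d.getD t ([] : PySem.Set Int) = [] →
      ((l.foldl (fun d t => d.insert t PySem.Set.empty) d).getD t ([] : PySem.Set Int)) = [] := by
  induction l with
  | nil => intro d hd; exact hd
  | cons x xs ih =>
    intro d hd
    rw [List.foldl_cons]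
    apply ih
    rw [PySem.Dict.getD_insert]
    split
    · rfl
    · exact hd

theorem pvKeys_adj0 (l : List Int) (hl : l.Nodup) :
    ((l.foldl (fun d t => d.insert t PySem.Set.empty) (PySem.Dict.empty : PySem.Dict Int (PySem.Set Int))).keys) = l := by
  have := PySem.Dict.keys_foldl_insert (κ := Int) (ν := PySem.Set Int) l
      (fun _ _ => PySem.Set.empty) PySem.Dict.empty
  simp only at this
  rw [this]
  simpa using PySem.Set.ofList_eq_self_of_nodup l hl

theorem pvNodup_pyRange (a b : Int) : (PySem.List.pyRange a b 1).Nodup := by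
  have key : ∀ (k : Nat) (a : Int), (b - a).toNat = k → (PySem.List.pyRange a b 1).Nodup := by
    intro k
    induction k with
    | zero =>
      intro a hk
      have : PySem.List.pyRange a b 1 = [] := by
        rw [List.eq_nil_iff_forall_not_mem]
        intro x hx
        rw [PySem.List.mem_pyRange_one] at hx
        omega
      rw [this]; exact List.nodup_nil
    | succ p ih =>
      intro a hk
      rw [PySem.List.pyRange_one_cons (by omega)]
      refine List.Nodup.cons ?_ (ih (a + 1) (by omega))
      intro hmem
      rw [PySem.List.mem_pyRange_one] at hmem
      omega
  exact key (b - a).toNat a rfl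

-- ---- enumerate characterisation ----

theorem pvMem_enumerate {α : Type} (xs : List α) (k0 : Int) (p : Int × α) :
    p ∈ PySem.List.enumerate xs k0 ↔ ∃ r : Nat, p.1 = k0 + (r : Int) ∧ xs[r]? = some p.2 := by
  induction xs generalizing k0 with
  | nil => simp [PySem.List.enumerate]
  | cons x rest ih =>
    rw [show PySem.List.enumerate (x :: rest) k0 = (k0, x) :: PySem.List.enumerate rest (k0 + 1) from rfl]
    rw [List.mem_cons, ih]
    constructor
    · rintro (rfl | ⟨r, hr, hg⟩)
      · exact ⟨0, by simp, by simp⟩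
      · exact ⟨r + 1, by push_cast; omega, by simpa using hg⟩
    · rintro ⟨r, hr, hg⟩
      cases r with
      | zero =>
        left
        simp only [List.getElem?_cons_zero, Option.some.injEq] at hg
        obtain ⟨p1, p2⟩ := p
        simp only at hr hg
        simp [hr, hg]
      | succ q =>
        right
        exact ⟨q, by push_cast at hr ⊢; omega, by simpa using hg⟩

theorem pvEnum_val_mem {α : Type} (xs : List α) (k0 : Int) (p : Int × α)
    (h : p ∈ PySem.List.enumerate xs k0) : p.2 ∈ xs := by
  rw [pvMem_enumerate] at h
  obtain ⟨r, -, hg⟩ := h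
  exact List.mem_of_getElem? hg

-- ---- B's one-pass dict build ----

theorem pvBNbr_mem (n M : Int) (W : List (List Int)) (a : Int)
    (adj : PySem.Dict Int (PySem.Set Int)) (p : Int × Int) (t u : Int) :
    u ∈ (pvBNbr n M W a adj p).getD t ([] : PySem.Set Int) ↔
      u ∈ adj.getD t ([] : PySem.Set Int) ∨
        ((0 ≤ p.1 ∧ p.1 < n ∧ 0 ≤ p.2 ∧ p.2 < M) ∧ pvId W p.1 p.2 ≠ a ∧ t = a ∧
          u = pvId W p.1 p.2) := by
  unfold pvBNbr
  simp only [pvId_def]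
  by_cases hw : 0 ≤ p.1 ∧ p.1 < n ∧ 0 ≤ p.2 ∧ p.2 < M
  · rw [if_pos hw]
    by_cases hab : pvId W p.1 p.2 ≠ a
    · rw [if_pos hab, PySem.Dict.getD_modify]
      by_cases hta : t = a
      · subst hta
        rw [if_pos rfl, PySem.Set.mem_add]
        tauto
      · rw [if_neg hta]
        tauto
    · rw [if_neg hab]
      tauto
  · rw [if_neg hw]
    tauto

theorem pvBNbr_nodup (n M : Int) (W : List (List Int)) (a : Int)
    (adj : PySem.Dict Int (PySem.Set Int)) (p : Int × Int) (t : Int)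
    (h : (adj.getD t ([] : PySem.Set Int)).Nodup) :
    ((pvBNbr n M W a adj p).getD t ([] : PySem.Set Int)).Nodup := by
  unfold pvBNbr
  by_cases hw : 0 ≤ p.1 ∧ p.1 < n ∧ 0 ≤ p.2 ∧ p.2 < M
  · rw [if_pos hw]
    by_cases hab : PySem.List.pyGetD (PySem.List.pyGetD W p.1 []) p.2 0 ≠ a
    · rw [if_pos hab, PySem.Dict.getD_modify]
      by_cases hta : t = a
      · subst hta; rw [if_pos rfl]; exact PySem.Set.nodup_add _ _ h
      · rw [if_neg hta]; exact h
    · rw [if_neg hab]; exact h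
  · rw [if_neg hw]; exact h

theorem pvBNbr_keys (n M : Int) (W : List (List Int)) (a : Int)
    (adj : PySem.Dict Int (PySem.Set Int)) (p : Int × Int) (K : List Int)
    (hK : adj.keys = K) (ha : a ∈ K) : (pvBNbr n M W a adj p).keys = K := by
  unfold pvBNbr
  by_cases hw : 0 ≤ p.1 ∧ p.1 < n ∧ 0 ≤ p.2 ∧ p.2 < M
  · rw [if_pos hw]
    by_cases hab : PySem.List.pyGetD (PySem.List.pyGetD W p.1 []) p.2 0 ≠ a
    · rw [if_pos hab, PySem.Dict.keys_modify, PySem.Dict.keys_insert_of_contains, hK]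
      rw [PySem.Dict.contains_iff_mem_keys, hK]
      exact ha
    · rw [if_neg hab]; exact hK
  · rw [if_neg hw]; exact hK

theorem pvBSweepN_mem (W : List (List Int)) (n M : Int)
    (adj : PySem.Dict Int (PySem.Set Int)) (t u : Int) :
    u ∈ ((PySem.List.enumerate W).foldl (pvBRowScan n M W) adj).getD t ([] : PySem.Set Int) ↔
      u ∈ adj.getD t ([] : PySem.Set Int) ∨
        ∃ pr ∈ PySem.List.enumerate W, ∃ q ∈ PySem.List.enumerate pr.2,
          ∃ p ∈ ([(pr.1 + 1, q.1), (pr.1, q.1 + 1), (pr.1 - 1, q.1), (pr.1, q.1 - 1)] : List (Int × Int)),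
            (0 ≤ p.1 ∧ p.1 < n ∧ 0 ≤ p.2 ∧ p.2 < M) ∧ pvId W p.1 p.2 ≠ q.2 ∧ t = q.2 ∧
              u = pvId W p.1 p.2 := by
  refine pvMem_getD_foldl _ _ t u _ ?_ adj
  intro d pr _
  show u ∈ (pvBRowScan n M W d pr).getD t ([] : PySem.Set Int) ↔ _
  unfold pvBRowScan
  refine pvMem_getD_foldl _ _ t u _ ?_ d
  intro d' q _
  show u ∈ (pvBCell n M W pr.1 d' q).getD t ([] : PySem.Set Int) ↔ _
  unfold pvBCell
  refine pvMem_getD_foldl _ _ t u _ ?_ d'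
  intro d'' p _
  exact pvBNbr_mem n M W q.2 d'' p t u

theorem pvBSweepN_nodup (W : List (List Int)) (n M : Int)
    (adj : PySem.Dict Int (PySem.Set Int)) (t : Int)
    (h : (adj.getD t ([] : PySem.Set Int)).Nodup) :
    (((PySem.List.enumerate W).foldl (pvBRowScan n M W) adj).getD t ([] : PySem.Set Int)).Nodup := by
  refine pvNodup_getD_foldl _ _ t ?_ adj h
  intro d pr hd
  show ((pvBRowScan n M W d pr).getD t ([] : PySem.Set Int)).Nodup
  unfold pvBRowScan
  refine pvNodup_getD_foldl _ _ t ?_ d hd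
  intro d' q hd'
  show ((pvBCell n M W pr.1 d' q).getD t ([] : PySem.Set Int)).Nodup
  unfold pvBCell
  refine pvNodup_getD_foldl _ _ t ?_ d' hd'
  intro d'' p hd''
  exact pvBNbr_nodup n M W q.2 d'' p t hd''

theorem pvBSweepN_keys (W : List (List Int)) (n M : Int) (K : List Int)
    (adj : PySem.Dict Int (PySem.Set Int)) (hK : adj.keys = K)
    (hval : ∀ row ∈ W, ∀ v ∈ row, v ∈ K) :
    ((PySem.List.enumerate W).foldl (pvBRowScan n M W) adj).keys = K := by
  refine pvKeys_foldl _ _ K ?_ adj hK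
  intro d pr hpr hd
  have hrow : pr.2 ∈ W := pvEnum_val_mem _ _ _ hpr
  show (pvBRowScan n M W d pr).keys = K
  unfold pvBRowScan
  refine pvKeys_foldl _ _ K ?_ d hd
  intro d' q hq hd'
  have hv : q.2 ∈ pr.2 := pvEnum_val_mem _ _ _ hq
  show (pvBCell n M W pr.1 d' q).keys = K
  unfold pvBCell
  refine pvKeys_foldl _ _ K ?_ d' hd'
  intro d'' p _ hd''
  exact pvBNbr_keys n M W q.2 d'' p K hd'' (hval pr.2 hrow q.2 hv)

-- ---- the bridge: A's per-block 4-direction scan ↔ B's per-cell recorded neighbours ----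

theorem pvBridge (rows : List (List Int)) (n M t u : Int) :
    ((∃ c ∈ ((pvCells 0 0 rows).filter (fun c => c.1 = t)).map (fun c => (c.2.1, c.2.2)),
        ∃ d ∈ pvDirs,
          (0 ≤ c.1 + d.1 ∧ c.1 + d.1 < n ∧ 0 ≤ c.2 + d.2 ∧ c.2 + d.2 < M) ∧
            u = pvId (pvWalls 0 rows) (c.1 + d.1) (c.2 + d.2)) ∧ u ≠ t)
    ↔ ∃ pr ∈ PySem.List.enumerate (pvWalls 0 rows), ∃ q ∈ PySem.List.enumerate pr.2,
        ∃ p ∈ ([(pr.1 + 1, q.1), (pr.1, q.1 + 1), (pr.1 - 1, q.1), (pr.1, q.1 - 1)] : List (Int × Int)),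
          (0 ≤ p.1 ∧ p.1 < n ∧ 0 ≤ p.2 ∧ p.2 < M) ∧ pvId (pvWalls 0 rows) p.1 p.2 ≠ q.2 ∧
            t = q.2 ∧ u = pvId (pvWalls 0 rows) p.1 p.2 := by
  constructor
  · rintro ⟨⟨⟨ci, cj⟩, hc, d, hd, hwin, hu⟩, hne⟩
    rw [pvMem_cellsOf, pvMem_cells] at hc
    obtain ⟨r, k, hci, hcj, hw⟩ := hc
    rcases Option.bind_eq_some_iff.1 hw with ⟨row, h1, h2⟩
    have hci' : ci = (r : Int) := by omega
    have hcj' : cj = (k : Int) := by omega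
    subst hci' hcj'
    have hd' : d = ((1:Int), (0:Int)) ∨ d = (0, 1) ∨ d = (-1, 0) ∨ d = (0, -1) := by
      simpa [pvDirs] using hd
    refine ⟨((r : Int), row), ?_, ((k : Int), t), ?_, ?_⟩
    · rw [pvMem_enumerate]; exact ⟨r, by simp, h1⟩
    · rw [pvMem_enumerate]; exact ⟨k, by simp, h2⟩
    subst hu
    dsimp only at hwin hne ⊢
    rcases hd' with rfl | rfl | rfl | rfl <;> dsimp only at hwin hne ⊢
    · refine ⟨((r : Int) + 1, (k : Int)), by simp, by dsimp only; omega, ?_, rfl, ?_⟩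
      · rw [add_zero] at hne
        dsimp only
        exact hne
      · dsimp only
        rw [add_zero]
    · refine ⟨((r : Int), (k : Int) + 1), by simp, by dsimp only; omega, ?_, rfl, ?_⟩
      · rw [add_zero] at hne
        dsimp only
        exact hne
      · dsimp only
        rw [add_zero]
    · refine ⟨((r : Int) - 1, (k : Int)), by simp, by dsimp only; omega, ?_, rfl, ?_⟩
      · rw [add_zero] at hne
        dsimp only
        rw [show (r : Int) - 1 = (r : Int) + -1 from by ring]
        exact hne
      · dsimp only
        rw [add_zero, show (r : Int) - 1 = (r : Int) + -1 from by ring]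
    · refine ⟨((r : Int), (k : Int) - 1), by simp, by dsimp only; omega, ?_, rfl, ?_⟩
      · rw [add_zero] at hne
        dsimp only
        rw [show (k : Int) - 1 = (k : Int) + -1 from by ring]
        exact hne
      · dsimp only
        rw [add_zero, show (k : Int) - 1 = (k : Int) + -1 from by ring]
  · rintro ⟨⟨i, row⟩, hpr, ⟨j, a⟩, hq, p, hp, hwin, hneq, ht, hu⟩
    rw [pvMem_enumerate] at hpr hq
    obtain ⟨r, hi, h1⟩ := hpr
    obtain ⟨k, hj, h2⟩ := hq
    dsimp only at hi hj h1 h2 ht hneq hu hp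
    have hi' : i = (r : Int) := by omega
    have hj' : j = (k : Int) := by omega
    subst hi' hj' ht
    have hcell : ((r : Int), (k : Int)) ∈
        ((pvCells 0 0 rows).filter (fun c => c.1 = t)).map (fun c => (c.2.1, c.2.2)) := by
      rw [pvMem_cellsOf, pvMem_cells]
      exact ⟨r, k, by simp, rfl, by rw [h1]; simpa using h2⟩
    have hp' : p = ((r : Int) + 1, (k : Int)) ∨ p = ((r : Int), (k : Int) + 1) ∨
        p = ((r : Int) - 1, (k : Int)) ∨ p = ((r : Int), (k : Int) - 1) := by
      simpa using hp
    refine ⟨⟨((r : Int), (k : Int)), hcell, ?_⟩, by rw [hu]; exact hneq⟩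
    rcases hp' with rfl | rfl | rfl | rfl <;> dsimp only at hwin hneq hu ⊢
    · exact ⟨(1, 0), by simp [pvDirs], by dsimp only; omega, by dsimp only; rw [add_zero]; exact hu⟩
    · exact ⟨(0, 1), by simp [pvDirs], by dsimp only; omega, by dsimp only; rw [add_zero]; exact hu⟩
    · refine ⟨(-1, 0), by simp [pvDirs], by dsimp only; omega, ?_⟩
      · dsimp only
        rw [add_zero, show (r : Int) + -1 = (r : Int) - 1 from by ring]
        exact hu
    · refine ⟨(0, -1), by simp [pvDirs], by dsimp only; omega, ?_⟩
      · dsimp only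
        rw [add_zero, show (k : Int) + -1 = (k : Int) - 1 from by ring]
        exact hu

-- ---- main assembly ----

theorem pvMain (block : List (List Int)) (hne : block ≠ [])
    (hcnt : (block.map List.length).sum = 0 ∨
      ((block.map List.length).sum : Int) < (block.length : Int) * block.headI.sum) :
    solution block = solution_alt block := by
  have hhead : PySem.List.pyGetD block 0 [] = block.headI := by
    cases block with
    | nil => exact absurd rfl hne
    | cons l r => simp [PySem.List.pyGetD_zero_cons, List.headI]
  simp only [solution, solution_alt, PySem.List.len_eq, hhead]
  rw [pvA_outer_fold block 0 0 [] _, pvB_outer_fold block 0 []]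
  simp only [zero_add, List.nil_append]
  set n : Int := (block.length : Int) with hn_def
  set M : Int := block.headI.sum with hM_def
  set T : Int := (((block.map List.length).sum : Nat) : Int) with hT_def
  set W : List (List Int) := pvWalls 0 block with hW_def
  set K : List Int := PySem.List.pyRange 1 (T + 1) 1 with hK_def
  set BL : List (List (Int × Int)) :=
    (pvCells 0 0 block).foldl pvBlStep (List.replicate ((n * M).toNat) []) with hBL_def
  set adj0 : PySem.Dict Int (PySem.Set Int) :=
    K.foldl (fun d t => d.insert t PySem.Set.empty) PySem.Dict.empty with hadj0_def
  set adjF : PySem.Dict Int (PySem.Set Int) :=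
    (PySem.List.enumerate W).foldl (pvBRowScan n M W) adj0 with hadjF_def
  have hKnd : K.Nodup := pvNodup_pyRange 1 (T + 1)
  have hval : ∀ row ∈ W, ∀ v ∈ row, v ∈ K := by
    intro row hrow v hv
    rw [hK_def, PySem.List.mem_pyRange_one]
    have := pvMem_walls 0 block row v (by rw [← hW_def]; exact hrow) hv
    omega
  have hadj0keys : adj0.keys = K := pvKeys_adj0 K hKnd
  have hkeys : adjF.keys = K := pvBSweepN_keys W n M K adj0 hadj0keys hval
  have hvalues : adjF.values = K.map (fun t => adjF.getD t ([] : PySem.Set Int)) := by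
    have h := PySem.Dict.values_eq_map_keys adjF (by rw [hkeys]; exact hKnd) ([] : PySem.Set Int)
    rw [hkeys] at h
    exact h
  rw [hvalues, List.foldl_map]
  apply PySem.List.foldl_congr_mem
  intro acc t htK
  rw [hK_def, PySem.List.mem_pyRange_one] at htK
  have hM0 : 0 ≤ M ∨ (pvCells 0 0 block) = [] := by
    by_cases h : pvCells 0 0 block = []
    · exact Or.inr h
    · left
      rcases List.exists_mem_of_ne_nil _ h with ⟨c, hc⟩
      have := pvCells_id_bounds block c hc
      rcases hcnt with h0 | hlt
      · exfalso
        have hT' : T = 0 := by rw [hT_def, h0]; rfl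
        omega
      · nlinarith [this.1, this.2, hlt]
  have hbounds : ∀ c ∈ pvCells 0 0 block,
      0 ≤ c.1 ∧ c.1 < ((List.replicate ((n * M).toNat) ([] : List (Int × Int))).length : Int) := by
    intro c hc
    have h := pvCells_id_bounds block c hc
    simp only [List.length_replicate]
    rcases hcnt with h0 | hlt
    · exfalso
      have hT' : T = 0 := by rw [hT_def, h0]; rfl
      omega
    · have hnM : (0 : Int) ≤ n * M := le_trans (by omega) (le_of_lt (lt_of_le_of_lt (by omega : (0:Int) ≤ T - T) (by omega : T - T < 1))) |>.trans (by omega)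
      constructor
      · omega
      · have hcast : ((n * M).toNat : Int) = n * M := by
          have h1 : (1 : Int) ≤ T := by omega
          have : (0 : Int) < n * M := lt_of_le_of_lt (by omega : (0:Int) ≤ T) hlt
          omega
        rw [hcast]
        omega
  have hBL_getD : PySem.List.pyGetD BL t []
      = ((pvCells 0 0 block).filter (fun c => c.1 = t)).map (fun c => (c.2.1, c.2.2)) := by
    rw [hBL_def, pvGetD_foldl_blStep _ _ t (by omega) hbounds, pvGetD_replicate_nil]
    simp only [List.nil_append]
  have hadj0getDt : adj0.getD t ([] : PySem.Set Int) = [] :=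
    pvGetD_adj0 K t PySem.Dict.empty rfl
  have hmemiff : ∀ u,
      u ∈ (if PySem.Set.contains ((PySem.List.pyGetD BL t []).foldl (pvACell n M W) PySem.Set.empty) t
           then (PySem.Set.remove? ((PySem.List.pyGetD BL t []).foldl (pvACell n M W) PySem.Set.empty) t).getD
                  ((PySem.List.pyGetD BL t []).foldl (pvACell n M W) PySem.Set.empty)
           else (PySem.List.pyGetD BL t []).foldl (pvACell n M W) PySem.Set.empty) ↔
        u ∈ adjF.getD t ([] : PySem.Set Int) := by
    intro u
    rw [pvMem_discard_port, pvMem_memA, hadjF_def, pvBSweepN_mem, hadj0getDt, hBL_getD]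
    simp only [List.not_mem_nil, false_or]
    have hempty : u ∈ (PySem.Set.empty : PySem.Set Int) ↔ False := by
      simp [PySem.Set.empty]
    rw [hempty, false_or]
    exact pvBridge block n M t u
  have hnd1 : (if PySem.Set.contains ((PySem.List.pyGetD BL t []).foldl (pvACell n M W) PySem.Set.empty) t
       then (PySem.Set.remove? ((PySem.List.pyGetD BL t []).foldl (pvACell n M W) PySem.Set.empty) t).getD
              ((PySem.List.pyGetD BL t []).foldl (pvACell n M W) PySem.Set.empty)
       else (PySem.List.pyGetD BL t []).foldl (pvACell n M W) PySem.Set.empty).Nodup :=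
    pvNodup_discard_port _ t (pvNodup_memA W n M _ _ (by simp [PySem.Set.empty]))
  have hnd2 : (adjF.getD t ([] : PySem.Set Int)).Nodup := by
    rw [hadjF_def]
    exact pvBSweepN_nodup W n M adj0 t (by rw [hadj0getDt]; exact List.nodup_nil)
  have hperm := (List.perm_ext_iff_of_nodup hnd1 hnd2).2 hmemiff
  have hlen : PySem.Set.len
      (if PySem.Set.contains ((PySem.List.pyGetD BL t []).foldl (pvACell n M W) PySem.Set.empty) t
       then (PySem.Set.remove? ((PySem.List.pyGetD BL t []).foldl (pvACell n M W) PySem.Set.empty) t).getD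
              ((PySem.List.pyGetD BL t []).foldl (pvACell n M W) PySem.Set.empty)
       else (PySem.List.pyGetD BL t []).foldl (pvACell n M W) PySem.Set.empty)
      = PySem.Set.len (adjF.getD t ([] : PySem.Set Int)) := by
    unfold PySem.Set.len
    exact congrArg _ hperm.length_eq
  show (if acc < PySem.Set.len
      (if PySem.Set.contains ((PySem.List.pyGetD BL t []).foldl (pvACell n M W) PySem.Set.empty) t
       then (PySem.Set.remove? ((PySem.List.pyGetD BL t []).foldl (pvACell n M W) PySem.Set.empty) t).getD
              ((PySem.List.pyGetD BL t []).foldl (pvACell n M W) PySem.Set.empty)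
       else (PySem.List.pyGetD BL t []).foldl (pvACell n M W) PySem.Set.empty)
    then PySem.Set.len
      (if PySem.Set.contains ((PySem.List.pyGetD BL t []).foldl (pvACell n M W) PySem.Set.empty) t
       then (PySem.Set.remove? ((PySem.List.pyGetD BL t []).foldl (pvACell n M W) PySem.Set.empty) t).getD
              ((PySem.List.pyGetD BL t []).foldl (pvACell n M W) PySem.Set.empty)
       else (PySem.List.pyGetD BL t []).foldl (pvACell n M W) PySem.Set.empty)
    else acc)
    = (if acc < PySem.Set.len (adjF.getD t ([] : PySem.Set Int))
       then PySem.Set.len (adjF.getD t ([] : PySem.Set Int)) else acc)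
  rw [hlen]

-- ===== VERDICT (by name: the statement is the Claim_ definition above) =====
theorem solution_spec : Claim_equal_solution := by
  unfold Claim_equal_solution
  intro block _ hpre
  unfold Spec_solution
  exact pvMain block hpre.1 hpre.2.2
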